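-- pv_equiv track=rewrite | github.com/MrBrantCode/unitest_baseline | mut_generate/mist_train_cf/cf_14850/solution.py | separate_string
-- ===== SOURCE A (Python) =====
-- def separate_string(s):
--     """
--     Separate a given string into three substrings: one containing only consonants,
--     one containing only vowels, and one containing any other characters.
--
--     Parameters:
--     s (str): The input string.
--
--     Returns:
--     tuple: A tuple containing three substrings: consonants, vowels, and other characters.
--     """
--     vowels = 'aeiouAEIOU'
--     consonants = ''
--     vowel_chars = ''
--     other_chars = ''
--
--     for char in s:
--         if char.isalpha():
--             if char in vowels:
--                 vowel_chars += char
--             else: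
--                 consonants += char
--         else:
--             other_chars += char
--
--     return consonants, vowel_chars, other_chars
-- ===== SOURCE B (Python) =====
-- def separate_string(s):
--     vowels = 'aeiouAEIOU'
--     consonants = ''.join(c for c in s if c.isalpha() and c not in vowels)
--     vowel_chars = ''.join(c for c in s if c.isalpha() and c in vowels)
--     other_chars = ''.join(c for c in s if not c.isalpha())
--     return consonants, vowel_chars, other_chars
-- ===== Notes on version B (the rewrite author's own statement) =====
-- stated objective: idiomatic
-- what changed: Replaces the single branching loop with string concatenation accumulators by three independent filter passes over the string, one per output bucket.
import Mathlib
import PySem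

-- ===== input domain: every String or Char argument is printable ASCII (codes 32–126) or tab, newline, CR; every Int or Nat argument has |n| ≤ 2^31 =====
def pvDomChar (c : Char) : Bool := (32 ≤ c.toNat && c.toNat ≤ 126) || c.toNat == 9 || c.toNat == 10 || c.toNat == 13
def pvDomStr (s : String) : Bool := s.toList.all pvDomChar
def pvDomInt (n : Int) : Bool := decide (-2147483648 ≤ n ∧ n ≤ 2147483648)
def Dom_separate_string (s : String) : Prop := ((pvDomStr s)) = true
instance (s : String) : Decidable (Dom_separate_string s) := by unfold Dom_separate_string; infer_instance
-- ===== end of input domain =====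

-- B replaces A's single branching loop by three independent filter passes, one per bucket (idiomatic).

-- ===== PORT A =====
-- single pass over the string, three growing accumulators, branches in A's order
def separate_string (s : String) : String × String × String :=
  let vowels : List Char := "aeiouAEIOU".toList
  let acc := s.toList.foldl
    (fun (acc : List Char × List Char × List Char) char =>
      if PySem.Chars.isalpha char then
        if char ∈ vowels then (acc.1, acc.2.1 ++ [char], acc.2.2)
        else (acc.1 ++ [char], acc.2.1, acc.2.2)
      else (acc.1, acc.2.1, acc.2.2 ++ [char]))
    ([], [], [])
  (String.ofList acc.1, String.ofList acc.2.1, String.ofList acc.2.2)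

-- ===== PORT B =====
-- three independent filter passes over the string
def separate_string_alt (s : String) : String × String × String :=
  let vowels : List Char := "aeiouAEIOU".toList
  (String.ofList (s.toList.filter (fun c => PySem.Chars.isalpha c && !(c ∈ vowels))),
   String.ofList (s.toList.filter (fun c => PySem.Chars.isalpha c && (c ∈ vowels))),
   String.ofList (s.toList.filter (fun c => !(PySem.Chars.isalpha c))))

-- ===== PRECONDITION & SPEC =====
def Spec_separate_string (s : String) (out : String × String × String) : Prop := out = separate_string_alt s
instance (s : String) (out : String × String × String) : Decidable (Spec_separate_string s out) := by unfold Spec_separate_string; infer_instance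

-- ===== CLAIM (what is proved, stated in full; the proofs are below) =====
def Claim_equal_separate_string : Prop := ∀ (s : String), Dom_separate_string s → Spec_separate_string s (separate_string s)

-- ===== LEMMAS AND PROOFS =====

-- loop invariant: A's fold is the three filters appended to the accumulators
theorem sep_fold_eq (l : List Char) (vs : List Char) (a b c : List Char) :
    l.foldl
      (fun (acc : List Char × List Char × List Char) char =>
        if PySem.Chars.isalpha char then
          if char ∈ vs then (acc.1, acc.2.1 ++ [char], acc.2.2)
          else (acc.1 ++ [char], acc.2.1, acc.2.2)
        else (acc.1, acc.2.1, acc.2.2 ++ [char]))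
      (a, b, c)
    = (a ++ l.filter (fun ch => PySem.Chars.isalpha ch && !(ch ∈ vs)),
       b ++ l.filter (fun ch => PySem.Chars.isalpha ch && (ch ∈ vs)),
       c ++ l.filter (fun ch => !(PySem.Chars.isalpha ch))) := by
  induction l generalizing a b c with
  | nil => simp
  | cons x xs ih =>
    simp only [List.foldl_cons, List.filter_cons]
    by_cases hx : PySem.Chars.isalpha x
    · by_cases hv : x ∈ vs
      · simp [hx, hv, ih]
      · simp [hx, hv, ih]
    · simp [hx, ih]

-- ===== VERDICT (by name: the statement is the Claim_ definition above) =====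
theorem separate_string_spec : Claim_equal_separate_string := by
  intro s _
  unfold Spec_separate_string separate_string separate_string_alt
  simp only [sep_fold_eq, List.nil_append]
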